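-- pv_equiv track=rewrite | github.com/Kalpithaac/appembroidery | services/stitch_color_order.py | assign_points_to_colors
-- ===== SOURCE A (Python) =====
-- def assign_points_to_colors(points, color_names):
--
--     color_groups = {}
--
--     for i,c in enumerate(color_names):
--         color_groups[c] = []
--
--         # every i'th point assigned to color
--         for idx,p in enumerate(points):
--             if idx % len(color_names) == i:
--                 color_groups[c].append(p)
--
--     return color_groups
-- ===== SOURCE B (Python) =====
-- def assign_points_to_colors(points, color_names):
--     # Single pass over points into residue buckets, then one pass over names
--     # keeping the last index per duplicate name; O(len(points)+len(color_names)).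
--     if not color_names:
--         return {}
--     n = len(color_names)
--     groups = [[] for _ in range(n)]
--     for idx, p in enumerate(points):
--         groups[idx % n].append(p)
--     last = {}
--     for i, c in enumerate(color_names):
--         last[c] = i
--     return {c: groups[i] for c, i in last.items()}
-- ===== Notes on version B (the rewrite author's own statement) =====
-- stated objective: faster
-- what changed: Replaced the nested scan (for each color, rescan all points) by a single pass distributing points into residue buckets plus a last-occurrence index map for duplicate names.
import Mathlib
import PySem

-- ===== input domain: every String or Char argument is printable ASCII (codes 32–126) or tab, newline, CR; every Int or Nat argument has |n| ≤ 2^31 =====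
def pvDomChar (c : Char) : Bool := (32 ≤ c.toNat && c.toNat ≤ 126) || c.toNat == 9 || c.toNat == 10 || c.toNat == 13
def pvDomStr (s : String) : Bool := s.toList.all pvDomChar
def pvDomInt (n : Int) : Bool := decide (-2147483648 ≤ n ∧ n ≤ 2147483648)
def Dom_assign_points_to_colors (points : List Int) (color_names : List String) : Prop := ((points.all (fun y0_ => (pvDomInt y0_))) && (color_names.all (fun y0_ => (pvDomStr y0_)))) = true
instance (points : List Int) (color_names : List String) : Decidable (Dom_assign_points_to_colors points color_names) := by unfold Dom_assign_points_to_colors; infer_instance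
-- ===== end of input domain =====

-- B replaces A's nested per-color rescan of the points by a single bucketing pass plus a
-- last-occurrence index map (objective: faster, asymptotic).

-- ===== PORT A =====
-- literal port of A: for each (i, c) in enumerate(color_names), reset color_groups[c] = [],
-- then rescan enumerate(points) appending p when idx % len(color_names) == i.
def assign_points_to_colors (points : List Int) (color_names : List String) : List (String × List Int) :=
  ((PySem.List.enumerate color_names 0).foldl
    (fun d ic =>
      (PySem.List.enumerate points 0).foldl
        (fun d' ip =>
          if PySem.Int.mod ip.1 (color_names.length : Int) == ic.1 then
            d'.modify ic.2 [] (· ++ [ip.2])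
          else d')
        (d.insert ic.2 ([] : List Int)))
    (PySem.Dict.empty : PySem.Dict String (List Int))).items

-- ===== PORT B =====
-- literal port of Source B: bucket points by idx % n in one pass (the index is in [0, n),
-- so .toNat is exact), build the last-occurrence map, then assemble the dict.
def assign_points_to_colors_alt (points : List Int) (color_names : List String) : List (String × List Int) :=
  if color_names.isEmpty then [] else
  let n := color_names.length
  let groups :=
    (PySem.List.enumerate points 0).foldl
      (fun gs ip =>
        let r := (PySem.Int.mod ip.1 (n : Int)).toNat
        gs.set r (gs.getD r [] ++ [ip.2]))
      (List.replicate n ([] : List Int))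
  let last :=
    (PySem.List.enumerate color_names 0).foldl
      (fun d ic => d.insert ic.2 ic.1)
      (PySem.Dict.empty : PySem.Dict String Int)
  last.items.map (fun ci => (ci.1, groups.getD ci.2.toNat []))

-- ===== PRECONDITION & SPEC =====
def Spec_assign_points_to_colors (points : List Int) (color_names : List String) (out : List (String × List Int)) : Prop := out = assign_points_to_colors_alt points color_names
instance (points : List Int) (color_names : List String) (out : List (String × List Int)) : Decidable (Spec_assign_points_to_colors points color_names out) := by unfold Spec_assign_points_to_colors; infer_instance

-- ===== CLAIM (what is proved, stated in full; the proofs are below) =====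
def Claim_equal_assign_points_to_colors : Prop := ∀ (points : List Int) (color_names : List String), Dom_assign_points_to_colors points color_names → Spec_assign_points_to_colors points color_names (assign_points_to_colors points color_names)

-- ===== LEMMAS AND PROOFS =====

-- A's outer-loop body, as a named function (definitionally the body of port A's fold)
def pvStep (points : List Int) (n : Int) (d : PySem.Dict String (List Int)) (ic : Int × String) :
    PySem.Dict String (List Int) :=
  (PySem.List.enumerate points 0).foldl
    (fun d' ip =>
      if PySem.Int.mod ip.1 n == ic.1 then d'.modify ic.2 [] (· ++ [ip.2]) else d')
    (d.insert ic.2 ([] : List Int))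

-- the points landing on residue class i
def pvGrp (points : List Int) (n i : Int) : List Int :=
  ((PySem.List.enumerate points 0).filter (fun ip => PySem.Int.mod ip.1 n == i)).map (·.2)

-- last-occurrence scan with accumulator
def pvLva (l : List (Int × String)) (k : String) (a : Option Int) : Option Int :=
  l.foldl (fun acc ic => if ic.2 = k then some ic.1 else acc) a

theorem pvA_eq (points : List Int) (color_names : List String) :
    assign_points_to_colors points color_names =
      ((PySem.List.enumerate color_names 0).foldl
        (pvStep points (color_names.length : Int))
        (PySem.Dict.empty : PySem.Dict String (List Int))).items := rfl

theorem pvInner_getD_self (n i : Int) (c : String) (l : List (Int × Int))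
    (d : PySem.Dict String (List Int)) :
    (l.foldl (fun d' ip => if PySem.Int.mod ip.1 n == i then d'.modify c [] (· ++ [ip.2]) else d') d).getD c []
      = d.getD c [] ++ (l.filter (fun ip => PySem.Int.mod ip.1 n == i)).map (·.2) := by
  induction l generalizing d with
  | nil => simp
  | cons p l ih =>
    simp only [List.foldl_cons, List.filter_cons]
    by_cases h : (PySem.Int.mod p.1 n == i) = true
    · rw [if_pos h, ih, PySem.Dict.getD_modify_self]
      simp [h]
    · rw [if_neg h, ih]
      simp [h]

theorem pvInner_getD_ne (n i : Int) (c k : String) (hk : k ≠ c) (l : List (Int × Int))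
    (d : PySem.Dict String (List Int)) :
    (l.foldl (fun d' ip => if PySem.Int.mod ip.1 n == i then d'.modify c [] (· ++ [ip.2]) else d') d).getD k []
      = d.getD k [] := by
  induction l generalizing d with
  | nil => rfl
  | cons p l ih =>
    simp only [List.foldl_cons]
    rw [ih]
    by_cases h : PySem.Int.mod p.1 n == i
    · simp [h, PySem.Dict.getD_modify_of_ne _ _ _ hk]
    · simp [h]

theorem pvInner_keys (n i : Int) (c : String) (l : List (Int × Int))
    (d : PySem.Dict String (List Int)) (hc : c ∈ d.keys) :
    (l.foldl (fun d' ip => if PySem.Int.mod ip.1 n == i then d'.modify c [] (· ++ [ip.2]) else d') d).keys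
      = d.keys := by
  induction l generalizing d with
  | nil => rfl
  | cons p l ih =>
    simp only [List.foldl_cons]
    by_cases h : PySem.Int.mod p.1 n == i
    · rw [if_pos h]
      have hk : (d.modify c [] (· ++ [p.2])).keys = d.keys := by
        rw [PySem.Dict.keys_modify, PySem.Dict.keys_insert_of_contains]
        rw [PySem.Dict.contains_iff_mem_keys]
        exact hc
      rw [ih _ (by rw [hk]; exact hc), hk]
    · rw [if_neg h]
      exact ih _ hc

theorem pvStep_getD (points : List Int) (n : Int) (d : PySem.Dict String (List Int))
    (ic : Int × String) (k : String) :
    (pvStep points n d ic).getD k [] =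
      if k = ic.2 then pvGrp points n ic.1 else d.getD k [] := by
  by_cases h : k = ic.2
  · subst h
    rw [pvStep, pvInner_getD_self, PySem.Dict.getD_insert_self, if_pos rfl]
    rfl
  · rw [pvStep, pvInner_getD_ne _ _ _ _ h, PySem.Dict.getD_insert_of_ne _ _ _ h, if_neg h]

theorem pvStep_keys (points : List Int) (n : Int) (d : PySem.Dict String (List Int))
    (ic : Int × String) :
    (pvStep points n d ic).keys = (d.insert ic.2 ([] : List Int)).keys := by
  rw [pvStep, pvInner_keys]
  exact (PySem.Dict.mem_keys_insert _ _ _ _).mpr (Or.inl rfl)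

theorem pvKeys_insert_eq_add {ν : Type} (d : PySem.Dict String ν) (k : String) (v : ν) :
    (d.insert k v).keys = PySem.Set.add d.keys k := by
  by_cases h : d.contains k = true
  · have hm : k ∈ d.keys := (PySem.Dict.contains_iff_mem_keys d k).mp h
    rw [PySem.Dict.keys_insert_of_contains _ _ h]
    simp [PySem.Set.add, PySem.Set.contains, hm]
  · have hm : k ∉ d.keys := fun hm => h ((PySem.Dict.contains_iff_mem_keys d k).mpr hm)
    rw [PySem.Dict.keys_insert_of_not_contains _ _ (by simpa using h)]
    simp [PySem.Set.add, PySem.Set.contains, hm]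

theorem pvLva_acc (l : List (Int × String)) (k : String) (a : Option Int) :
    pvLva l k a = match pvLva l k none with | some i => some i | none => a := by
  induction l generalizing a with
  | nil => simp [pvLva]
  | cons ic l ih =>
    simp only [pvLva, List.foldl_cons] at *
    rw [ih, ih (if ic.2 = k then some ic.1 else none)]
    cases h : l.foldl (fun acc ic => if ic.2 = k then some ic.1 else acc) none with
    | some j => rfl
    | none => by_cases hc : ic.2 = k <;> simp [hc]

theorem pvOuter_getD (points : List Int) (n : Int) (l : List (Int × String))
    (d : PySem.Dict String (List Int)) (k : String) :
    (l.foldl (pvStep points n) d).getD k [] =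
      match pvLva l k none with
      | some i => pvGrp points n i
      | none => d.getD k [] := by
  induction l generalizing d with
  | nil => simp [pvLva]
  | cons ic l ih =>
    simp only [List.foldl_cons]
    rw [ih]
    have hacc : pvLva (ic :: l) k none =
        match pvLva l k none with
        | some i => some i
        | none => (if ic.2 = k then some ic.1 else none) := by
      rw [pvLva, List.foldl_cons, ← pvLva, pvLva_acc]
    rw [hacc]
    cases h : pvLva l k none with
    | some j => rfl
    | none =>
      rw [pvStep_getD]
      by_cases hc : ic.2 = k
      · simp [hc]
      · have hck : ¬ k = ic.2 := fun hh => hc hh.symm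
        simp [hc, hck]

theorem pvOuter_keys (points : List Int) (n : Int) (l : List (Int × String))
    (d : PySem.Dict String (List Int)) :
    (l.foldl (pvStep points n) d).keys = PySem.Set.update d.keys (l.map (·.2)) := by
  induction l generalizing d with
  | nil => simp [PySem.Set.update_nil]
  | cons ic l ih =>
    simp only [List.foldl_cons, List.map_cons]
    rw [ih, pvStep_keys, pvKeys_insert_eq_add, PySem.Set.update_cons]

theorem pvOuter_nodup (points : List Int) (n : Int) (l : List (Int × String))
    (d : PySem.Dict String (List Int)) (h : d.keys.Nodup) :
    (l.foldl (pvStep points n) d).keys.Nodup := by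
  induction l generalizing d with
  | nil => exact h
  | cons ic l ih =>
    simp only [List.foldl_cons]
    refine ih _ ?_
    rw [pvStep_keys]
    exact PySem.Dict.nodup_keys_insert _ _ _ h

theorem pvLast_getD (l : List (Int × String)) (d : PySem.Dict String Int) (k : String) :
    (l.foldl (fun d' ic => d'.insert ic.2 ic.1) d).getD k 0 =
      match pvLva l k none with
      | some i => i
      | none => d.getD k 0 := by
  induction l generalizing d with
  | nil => simp [pvLva]
  | cons ic l ih =>
    simp only [List.foldl_cons]
    rw [ih]
    have hacc : pvLva (ic :: l) k none =
        match pvLva l k none with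
        | some i => some i
        | none => (if ic.2 = k then some ic.1 else none) := by
      rw [pvLva, List.foldl_cons, ← pvLva, pvLva_acc]
    rw [hacc]
    cases h : pvLva l k none with
    | some j => rfl
    | none =>
      rw [PySem.Dict.getD_insert]
      by_cases hc : ic.2 = k
      · simp [hc]
      · have hck : ¬ k = ic.2 := fun hh => hc hh.symm
        simp [hc, hck]

theorem pvLast_keys (l : List (Int × String)) (d : PySem.Dict String Int) :
    (l.foldl (fun d' ic => d'.insert ic.2 ic.1) d).keys = PySem.Set.update d.keys (l.map (·.2)) := by
  induction l generalizing d with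
  | nil => simp [PySem.Set.update_nil]
  | cons ic l ih =>
    simp only [List.foldl_cons, List.map_cons]
    rw [ih, pvKeys_insert_eq_add, PySem.Set.update_cons]

theorem pvLast_nodup (l : List (Int × String)) (d : PySem.Dict String Int) (h : d.keys.Nodup) :
    (l.foldl (fun d' ic => d'.insert ic.2 ic.1) d).keys.Nodup := by
  induction l generalizing d with
  | nil => exact h
  | cons ic l ih =>
    simp only [List.foldl_cons]
    exact ih _ (PySem.Dict.nodup_keys_insert _ _ _ h)

theorem pvGroups_getD (n : Nat) (hn : 0 < n) (l : List (Int × Int)) (gs : List (List Int))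
    (hlen : gs.length = n) (j : Nat) (hj : j < n) :
    (l.foldl (fun gs' ip =>
        gs'.set (PySem.Int.mod ip.1 (n : Int)).toNat
          (gs'.getD (PySem.Int.mod ip.1 (n : Int)).toNat [] ++ [ip.2])) gs).getD j []
      = gs.getD j [] ++ (l.filter (fun ip => (PySem.Int.mod ip.1 (n : Int)).toNat == j)).map (·.2) := by
  induction l generalizing gs with
  | nil => simp
  | cons p l ih =>
    simp only [List.foldl_cons, List.filter_cons]
    set r := (PySem.Int.mod p.1 (n : Int)).toNat with hr
    have hrn : r < n := by
      have h1 := PySem.Int.mod_lt p.1 (b := (n : Int)) (by exact_mod_cast hn)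
      have h2 := PySem.Int.mod_nonneg p.1 (b := (n : Int)) (by exact_mod_cast hn)
      omega
    have hlen' : (gs.set r (gs.getD r [] ++ [p.2])).length = n := by
      simp [hlen]
    rw [ih _ hlen']
    have hget : (gs.set r (gs.getD r [] ++ [p.2])).getD j [] =
        if r = j then gs.getD r [] ++ [p.2] else gs.getD j [] := by
      by_cases hjr : r = j
      · subst hjr
        simp [List.getD_eq_getElem?_getD, List.getElem?_set, hlen, hrn]
      · simp [List.getD_eq_getElem?_getD, List.getElem?_set, hjr]
    rw [hget]
    by_cases hjr : r = j
    · simp [hjr, List.append_assoc]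
    · have : ¬ (r == j) = true := by simpa using hjr
      simp [this, hjr]

theorem pvLva_isSome_acc (l : List (Int × String)) (k : String) (a : Option Int) (h : a.isSome) :
    (pvLva l k a).isSome := by
  induction l generalizing a with
  | nil => exact h
  | cons ic l ih =>
    simp only [pvLva, List.foldl_cons] at *
    apply ih
    by_cases hc : ic.2 = k <;> simp [hc, h]

theorem pvLva_some_of_mem (l : List (Int × String)) (k : String) (a : Option Int)
    (h : k ∈ l.map (·.2)) : (pvLva l k a).isSome := by
  induction l generalizing a with
  | nil => simp at h
  | cons ic l ih =>
    simp only [List.map_cons, List.mem_cons] at h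
    simp only [pvLva, List.foldl_cons]
    rcases h with h | h
    · apply pvLva_isSome_acc
      simp [h]
    · exact ih _ h

theorem pvLva_mem (l : List (Int × String)) (k : String) (i : Int) (a : Option Int)
    (h : pvLva l k a = some i) : (∃ c, (i, c) ∈ l) ∨ a = some i := by
  induction l generalizing a with
  | nil => exact Or.inr h
  | cons ic l ih =>
    simp only [pvLva, List.foldl_cons] at h
    rcases ih _ h with ⟨c, hc⟩ | hacc
    · exact Or.inl ⟨c, List.mem_cons_of_mem _ hc⟩
    · by_cases hck : ic.2 = k
      · rw [if_pos hck] at hacc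
        exact Or.inl ⟨ic.2, by simp [← Option.some_inj.mp hacc]⟩
      · rw [if_neg hck] at hacc
        exact Or.inr hacc

theorem pvB_eq (points : List Int) (cns : List String) (h : cns.isEmpty = false) :
    assign_points_to_colors_alt points cns =
      ((PySem.List.enumerate cns 0).foldl (fun d' ic => d'.insert ic.2 ic.1)
          (PySem.Dict.empty : PySem.Dict String Int)).items.map
        (fun ci => (ci.1,
          ((PySem.List.enumerate points 0).foldl
            (fun gs ip =>
              gs.set (PySem.Int.mod ip.1 (cns.length : Int)).toNat
                (gs.getD (PySem.Int.mod ip.1 (cns.length : Int)).toNat [] ++ [ip.2]))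
            (List.replicate cns.length ([] : List Int))).getD ci.2.toNat [])) := by
  rw [assign_points_to_colors_alt, h]
  rfl

theorem pvBeq_toNat (a b : Int) (ha : 0 ≤ a) (hb : 0 ≤ b) :
    (a.toNat == b.toNat) = (a == b) := by
  by_cases hab : a = b
  · simp [hab]
  · have h2 : a.toNat ≠ b.toNat := by omega
    simp [hab, h2]

-- ===== VERDICT (by name: the statement is the Claim_ definition above) =====
theorem assign_points_to_colors_spec : Claim_equal_assign_points_to_colors := by
  intro points cns _dom
  unfold Spec_assign_points_to_colors
  by_cases hE : cns.isEmpty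
  · have h0 : cns = [] := List.isEmpty_iff.mp hE
    subst h0
    rfl
  · have hE' : cns.isEmpty = false := by simpa using hE
    have hn : 0 < cns.length := by
      cases cns with
      | nil => simp at hE'
      | cons a l => simp
    rw [pvB_eq points cns hE', pvA_eq]
    have hAnodup : ((PySem.List.enumerate cns 0).foldl (pvStep points (cns.length : Int))
        (PySem.Dict.empty : PySem.Dict String (List Int))).keys.Nodup :=
      pvOuter_nodup _ _ _ _ (by simp [PySem.Dict.keys_empty])
    have hLnodup : ((PySem.List.enumerate cns 0).foldl (fun d' ic => d'.insert ic.2 ic.1)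
        (PySem.Dict.empty : PySem.Dict String Int)).keys.Nodup :=
      pvLast_nodup _ _ (by simp [PySem.Dict.keys_empty])
    rw [PySem.Dict.items_eq_map_keys _ hAnodup [], PySem.Dict.items_eq_map_keys _ hLnodup 0,
      List.map_map]
    have hkeys : ((PySem.List.enumerate cns 0).foldl (fun d' ic => d'.insert ic.2 ic.1)
          (PySem.Dict.empty : PySem.Dict String Int)).keys
        = ((PySem.List.enumerate cns 0).foldl (pvStep points (cns.length : Int))
          (PySem.Dict.empty : PySem.Dict String (List Int))).keys := by
      rw [pvOuter_keys, pvLast_keys]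
      rfl
    rw [← hkeys]
    simp only [Function.comp_def]
    apply List.map_congr_left
    intro k hk
    -- k is one of the color names: the last-occurrence scan finds an index i
    have hkmem : k ∈ (PySem.List.enumerate cns 0).map (·.2) := by
      rw [pvLast_keys] at hk
      rcases (PySem.Set.mem_update _ _ _).mp hk with h | h
      · simp [PySem.Dict.keys_empty] at h
      · exact h
    obtain ⟨i, hsome⟩ := Option.isSome_iff_exists.mp (pvLva_some_of_mem _ _ none hkmem)
    obtain ⟨c, hic⟩ := (pvLva_mem _ _ _ _ hsome).resolve_right (by simp)
    obtain ⟨kk, hkk, hpair⟩ := (PySem.List.mem_enumerate_iff _ _ _).mp hic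
    have hi0 : 0 ≤ i := by
      have : i = (0 : Int) + (kk : Int) := congrArg Prod.fst hpair
      omega
    have hin : i < (cns.length : Int) := by
      have : i = (0 : Int) + (kk : Int) := congrArg Prod.fst hpair
      omega
    have hitn : i.toNat < cns.length := by omega
    -- evaluate both sides at k
    have hB : ((PySem.List.enumerate points 0).foldl
          (fun gs ip =>
            gs.set (PySem.Int.mod ip.1 (cns.length : Int)).toNat
              (gs.getD (PySem.Int.mod ip.1 (cns.length : Int)).toNat [] ++ [ip.2]))
          (List.replicate cns.length ([] : List Int))).getD i.toNat []
        = pvGrp points (cns.length : Int) i := by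
      rw [pvGroups_getD cns.length hn _ _ (by simp) i.toNat hitn]
      have hrep : (List.replicate cns.length ([] : List Int)).getD i.toNat [] = [] := by
        simp [List.getD_eq_getElem?_getD, hitn]
      rw [hrep, List.nil_append, pvGrp]
      apply congrArg
      apply List.filter_congr
      intro ip _
      have hm0 : 0 ≤ PySem.Int.mod ip.1 (cns.length : Int) :=
        PySem.Int.mod_nonneg ip.1 (by exact_mod_cast hn)
      exact (pvBeq_toNat _ _ hm0 hi0)
    rw [pvOuter_getD, pvLast_getD, hsome, hB]
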